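-- pv_equiv track=rewrite | github.com/CodingProgrammer/HackerRank_Python | (Search)Connected_Cells_in_a_Grid(Failed).py | surround
-- ===== SOURCE A (Python) =====
-- def surround(l_res, to_deter):
--     for each in l_res:
--         if each[0] == to_deter[0] - 1 and each[1] == to_deter[1] - 1:
--             return True
--         if each[0] == to_deter[0] - 1 and each[1] == to_deter[1]:
--             return True
--         if each[0] == to_deter[0] - 1 and each[1] == to_deter[1] + 1:
--             return True
--         if each[0] == to_deter[0] and each[1] == to_deter[1] - 1:
--             return True
--         if each[0] == to_deter[0] and each[1] == to_deter[1] + 1: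
--             return True
--         if each[0] == to_deter[0] + 1 and each[1] == to_deter[1] - 1:
--             return True
--         if each[0] == to_deter[0] + 1 and each[1] == to_deter[1]:
--             return True
--         if each[0] == to_deter[0] + 1 and each[1] == to_deter[1] + 1:
--             return True
--
--     return False
-- ===== SOURCE B (Python) =====
-- def surround(l_res, to_deter):
--     occupied = {(c[0], c[1]) for c in l_res}
--     x, y = to_deter[0], to_deter[1]
--     for dx in (-1, 0, 1):
--         for dy in (-1, 0, 1):
--             if (dx, dy) != (0, 0) and (x + dx, y + dy) in occupied:
--                 return True
--     return False
-- ===== Notes on version B (the rewrite author's own statement) =====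
-- stated objective: idiomatic
-- what changed: Instead of scanning l_res and testing each cell against eight inline coordinate comparisons, B builds a set of occupied cells once and iterates over the eight fixed neighbor offsets, testing membership.
import Mathlib
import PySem

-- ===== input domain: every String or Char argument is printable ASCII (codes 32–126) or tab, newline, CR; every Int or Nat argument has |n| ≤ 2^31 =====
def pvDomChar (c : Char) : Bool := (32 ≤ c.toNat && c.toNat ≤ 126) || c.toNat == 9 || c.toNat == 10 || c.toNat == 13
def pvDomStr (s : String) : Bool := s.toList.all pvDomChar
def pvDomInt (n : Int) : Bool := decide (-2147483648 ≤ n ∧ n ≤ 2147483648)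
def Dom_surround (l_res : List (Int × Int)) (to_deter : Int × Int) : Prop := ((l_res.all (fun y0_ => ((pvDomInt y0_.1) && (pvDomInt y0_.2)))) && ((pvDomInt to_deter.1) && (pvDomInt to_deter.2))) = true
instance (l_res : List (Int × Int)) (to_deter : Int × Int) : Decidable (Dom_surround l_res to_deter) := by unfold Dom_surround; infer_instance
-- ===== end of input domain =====

-- B builds a set of occupied cells once and checks the eight neighbor offsets for membership (idiomatic rewrite of A's per-cell comparison chain).

-- ===== PORT A =====
def surround (l_res : List (Int × Int)) (to_deter : Int × Int) : Bool :=
  match l_res with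
  | [] => false
  | each :: rest =>
    if each.1 == to_deter.1 - 1 && each.2 == to_deter.2 - 1 then true
    else if each.1 == to_deter.1 - 1 && each.2 == to_deter.2 then true
    else if each.1 == to_deter.1 - 1 && each.2 == to_deter.2 + 1 then true
    else if each.1 == to_deter.1 && each.2 == to_deter.2 - 1 then true
    else if each.1 == to_deter.1 && each.2 == to_deter.2 + 1 then true
    else if each.1 == to_deter.1 + 1 && each.2 == to_deter.2 - 1 then true
    else if each.1 == to_deter.1 + 1 && each.2 == to_deter.2 then true
    else if each.1 == to_deter.1 + 1 && each.2 == to_deter.2 + 1 then true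
    else surround rest to_deter

-- ===== PORT B =====
def surround_alt (l_res : List (Int × Int)) (to_deter : Int × Int) : Bool :=
  let occupied : PySem.Set (Int × Int) := PySem.Set.ofList (l_res.map (fun c => (c.1, c.2)))
  ([(-1, -1), (-1, 0), (-1, 1), (0, -1), (0, 1), (1, -1), (1, 0), (1, 1)] : List (Int × Int)).any
    (fun d => PySem.Set.contains occupied (to_deter.1 + d.1, to_deter.2 + d.2))

-- ===== PRECONDITION & SPEC =====
def Spec_surround (l_res : List (Int × Int)) (to_deter : Int × Int) (out : Bool) : Prop := out = surround_alt l_res to_deter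
instance (l_res : List (Int × Int)) (to_deter : Int × Int) (out : Bool) : Decidable (Spec_surround l_res to_deter out) := by unfold Spec_surround; infer_instance

-- ===== CLAIM (what is proved, stated in full; the proofs are below) =====
def Claim_equal_surround : Prop := ∀ (l_res : List (Int × Int)) (to_deter : Int × Int), Dom_surround l_res to_deter → Spec_surround l_res to_deter (surround l_res to_deter)

-- ===== LEMMAS AND PROOFS =====

theorem surround_eq_true_iff (l : List (Int × Int)) (t : Int × Int) :
    surround l t = true ↔ ∃ e ∈ l, (e = (t.1 - 1, t.2 - 1) ∨ e = (t.1 - 1, t.2) ∨ e = (t.1 - 1, t.2 + 1) ∨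
      e = (t.1, t.2 - 1) ∨ e = (t.1, t.2 + 1) ∨
      e = (t.1 + 1, t.2 - 1) ∨ e = (t.1 + 1, t.2) ∨ e = (t.1 + 1, t.2 + 1)) := by
  induction l with
  | nil => simp [surround]
  | cons e rest ih =>
    simp only [surround, List.mem_cons]
    constructor
    · intro h
      split_ifs at h with h1 h2 h3 h4 h5 h6 h7 h8
      · exact ⟨e, Or.inl rfl, by simp_all [Prod.ext_iff]⟩
      · exact ⟨e, Or.inl rfl, by simp_all [Prod.ext_iff]⟩
      · exact ⟨e, Or.inl rfl, by simp_all [Prod.ext_iff]⟩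
      · exact ⟨e, Or.inl rfl, by simp_all [Prod.ext_iff]⟩
      · exact ⟨e, Or.inl rfl, by simp_all [Prod.ext_iff]⟩
      · exact ⟨e, Or.inl rfl, by simp_all [Prod.ext_iff]⟩
      · exact ⟨e, Or.inl rfl, by simp_all [Prod.ext_iff]⟩
      · exact ⟨e, Or.inl rfl, by simp_all [Prod.ext_iff]⟩
      · obtain ⟨x, hx, hp⟩ := ih.mp h
        exact ⟨x, Or.inr hx, hp⟩
    · rintro ⟨x, hx, hp⟩
      rcases hx with rfl | hx
      · split_ifs with h1 h2 h3 h4 h5 h6 h7 h8 <;> try rfl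
        exfalso
        rcases hp with h | h | h | h | h | h | h | h <;> subst h <;> simp_all
      · split_ifs <;> try rfl
        exact ih.mpr ⟨x, hx, hp⟩

theorem surround_alt_eq_true_iff (l : List (Int × Int)) (t : Int × Int) :
    surround_alt l t = true ↔ ∃ e ∈ l, (e = (t.1 - 1, t.2 - 1) ∨ e = (t.1 - 1, t.2) ∨ e = (t.1 - 1, t.2 + 1) ∨
      e = (t.1, t.2 - 1) ∨ e = (t.1, t.2 + 1) ∨
      e = (t.1 + 1, t.2 - 1) ∨ e = (t.1 + 1, t.2) ∨ e = (t.1 + 1, t.2 + 1)) := by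
  simp only [surround_alt, List.any_eq_true, List.mem_cons, List.not_mem_nil, or_false,
    PySem.Set.contains, List.contains_eq_mem, PySem.Set.mem_ofList, List.mem_map, decide_eq_true_eq]
  constructor
  · rintro ⟨d, hd, e, he, hee⟩
    refine ⟨e, he, ?_⟩
    rcases hd with rfl | rfl | rfl | rfl | rfl | rfl | rfl | rfl <;>
      simp_all [Prod.ext_iff] <;> omega
  · rintro ⟨e, he, hp⟩
    rcases hp with rfl | rfl | rfl | rfl | rfl | rfl | rfl | rfl
    · exact ⟨(-1, -1), by simp, (t.1 - 1, t.2 - 1), he, by rw [Prod.ext_iff]; exact ⟨by ring, by ring⟩⟩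
    · exact ⟨(-1, 0), by simp, (t.1 - 1, t.2), he, by rw [Prod.ext_iff]; exact ⟨by ring, by ring⟩⟩
    · exact ⟨(-1, 1), by simp, (t.1 - 1, t.2 + 1), he, by rw [Prod.ext_iff]; exact ⟨by ring, by ring⟩⟩
    · exact ⟨(0, -1), by simp, (t.1, t.2 - 1), he, by rw [Prod.ext_iff]; exact ⟨by ring, by ring⟩⟩
    · exact ⟨(0, 1), by simp, (t.1, t.2 + 1), he, by rw [Prod.ext_iff]; exact ⟨by ring, by ring⟩⟩
    · exact ⟨(1, -1), by simp, (t.1 + 1, t.2 - 1), he, by rw [Prod.ext_iff]; exact ⟨by ring, by ring⟩⟩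
    · exact ⟨(1, 0), by simp, (t.1 + 1, t.2), he, by rw [Prod.ext_iff]; exact ⟨by ring, by ring⟩⟩
    · exact ⟨(1, 1), by simp, (t.1 + 1, t.2 + 1), he, by rw [Prod.ext_iff]; exact ⟨by ring, by ring⟩⟩

-- ===== VERDICT (by name: the statement is the Claim_ definition above) =====
theorem surround_spec : Claim_equal_surround := by
  intro l t _
  unfold Spec_surround
  rw [Bool.eq_iff_iff, surround_eq_true_iff, surround_alt_eq_true_iff]
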